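-- pv_equiv track=rewrite | github.com/hoonseojung/cote | programmers/most_received_gift.py | solution
-- ===== SOURCE A (Python) =====
-- def solution(friends, gifts):
--     answer = 0
--     gift_index = {} # 선물 지수
--     for friend in friends:
--         gift_index[friend] = [0, {i: 0 for i in friends}]
--     for gift in gifts:
--         A, B = gift.split()
--         gift_index[A][0] += 1
--         gift_index[A][1][B] += 1 # A가 B에게 준 선물 개수
--         gift_index[B][0] -= 1
--
--     for giver, info in gift_index.items():
--         get = 0
--         for reciever, num in info[1].items():
--             if giver == reciever: continue
--             if num > gift_index[reciever][1][giver]: # 더 많이 줬으면, 하나 받기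
--                 get += 1
--             elif num == gift_index[reciever][1][giver]: # 같은 수를 주거나 서로 안 주고 받았다면, 선물 지수 확인
--                 if gift_index[giver][0] > gift_index[reciever][0]: # 선물 지수가 더 크다면, 하나 받기
--                     get += 1
--         answer = max(answer, get)
--     return answer
-- ===== SOURCE B (Python) =====
-- def solution(friends, gifts):
--     names = list(dict.fromkeys(friends))
--     score = dict.fromkeys(names, 0)
--     diff = {}  # (x, y) -> gifts x gave y minus gifts y gave x
--     for gift in gifts:
--         a, b = gift.split()
--         score[a] += 1
--         score[b] -= 1
--         diff[(a, b)] = diff.get((a, b), 0) + 1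
--         diff[(b, a)] = diff.get((b, a), 0) - 1
--     vals = sorted(score.values())
--     wins = {}
--     for f in names:
--         s = score[f]
--         # binary search: number of scores strictly below s
--         lo, hi = 0, len(vals)
--         while lo < hi:
--             mid = (lo + hi) // 2
--             if vals[mid] < s:
--                 lo = mid + 1
--             else:
--                 hi = mid
--         wins[f] = lo
--     # correct the rank only on pairs that actually exchanged gifts
--     for (x, y), d in diff.items():
--         if d > 0:
--             wins[x] += 1
--         if d != 0 and score[y] < score[x]:
--             wins[x] -= 1
--     return max(wins.values(), default=0)
-- ===== Notes on version B (the rewrite author's own statement) =====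
-- stated objective: alternative
-- what changed: A materialises an n-by-n zero table per friend and recounts head-to-head wins over every ordered pair of friends; B never compares pairs of friends at all: it computes each friend's rank among the sorted gift scores by a hand-written binary search (which is already the answer for every pair that exchanged nothing) and then corrects that rank only over the sparse set of ordered pairs actually occurring in the gifts list.
import Mathlib
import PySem

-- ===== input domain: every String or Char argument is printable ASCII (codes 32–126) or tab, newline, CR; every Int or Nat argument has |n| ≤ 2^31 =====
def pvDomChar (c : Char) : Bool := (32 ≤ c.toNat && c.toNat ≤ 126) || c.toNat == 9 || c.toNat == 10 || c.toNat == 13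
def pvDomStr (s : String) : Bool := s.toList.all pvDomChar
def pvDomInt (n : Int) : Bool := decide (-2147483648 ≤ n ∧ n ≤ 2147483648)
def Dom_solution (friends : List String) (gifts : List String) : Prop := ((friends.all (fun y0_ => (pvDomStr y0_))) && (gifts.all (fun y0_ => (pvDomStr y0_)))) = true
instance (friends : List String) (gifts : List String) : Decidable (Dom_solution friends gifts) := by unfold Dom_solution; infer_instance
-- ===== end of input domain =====

-- B drops A's all-pairs comparison over an n×n table of per-friend gift dicts: it ranks each
-- friend among the sorted gift scores by binary search and corrects that rank only on the
-- sparse pairs that actually exchanged gifts (objective: alternative algorithm, no pair scan).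

-- ===== PORT A =====
-- one gift "A B": gift_index[A][0] += 1; gift_index[A][1][B] += 1; gift_index[B][0] -= 1
def stepA (d : PySem.Dict String (Int × PySem.Dict String Int)) (gift : String) :
    PySem.Dict String (Int × PySem.Dict String Int) :=
  match PySem.Str.split₀ gift with
  | [A, B] =>
    -- KeyError when A or B is not in gift_index: those inputs are outside Pre_solution
    let iA := d.getD A (0, PySem.Dict.empty)
    let d1 := d.insert A (iA.1 + 1, iA.2)
    let iA2 := d1.getD A (0, PySem.Dict.empty)
    let d2 := d1.insert A (iA2.1, iA2.2.insert B (iA2.2.getD B 0 + 1))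
    let iB := d2.getD B (0, PySem.Dict.empty)
    d2.insert B (iB.1 - 1, iB.2)
  | _ => d  -- ValueError on 'A, B = gift.split()': outside Pre_solution

-- body of 'for reciever, num in info[1].items()'
def innerA (giftIndex : PySem.Dict String (Int × PySem.Dict String Int)) (giver : String)
    (get : Int) (rn : String × Int) : Int :=
  if giver == rn.1 then get
  else if rn.2 > (giftIndex.getD rn.1 (0, PySem.Dict.empty)).2.getD giver 0 then get + 1
  else if rn.2 == (giftIndex.getD rn.1 (0, PySem.Dict.empty)).2.getD giver 0 then
    if (giftIndex.getD giver (0, PySem.Dict.empty)).1 >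
        (giftIndex.getD rn.1 (0, PySem.Dict.empty)).1 then get + 1 else get
  else get

-- 'for friend in friends: gift_index[friend] = [0, {i: 0 for i in friends}]'
def giftIndexInit (friends : List String) : PySem.Dict String (Int × PySem.Dict String Int) :=
  friends.foldl (fun d friend =>
    d.insert friend (0, friends.foldl (fun inner i => inner.insert i 0) PySem.Dict.empty))
    PySem.Dict.empty

def giftIndexFinal (friends : List String) (gifts : List String) :
    PySem.Dict String (Int × PySem.Dict String Int) :=
  gifts.foldl stepA (giftIndexInit friends)

def solution (friends : List String) (gifts : List String) : Int :=
  (giftIndexFinal friends gifts).items.foldl (fun answer gi =>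
    max answer (gi.2.2.items.foldl (innerA (giftIndexFinal friends gifts) gi.1) 0)) 0

-- ===== PORT B =====
-- one gift "a b": score[a] += 1; score[b] -= 1; diff[(a,b)] += 1; diff[(b,a)] -= 1
def stepB (sd : PySem.Dict String Int × PySem.Dict (String × String) Int) (gift : String) :
    PySem.Dict String Int × PySem.Dict (String × String) Int :=
  match PySem.Str.split₀ gift with
  | [a, b] =>
    -- 'score[a] += 1' raises KeyError when a ∉ names: outside Pre_solution, so getD is exact here
    let score := sd.1.insert a (sd.1.getD a 0 + 1)
    let score := score.insert b (score.getD b 0 - 1)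
    let diff := sd.2.insert (a, b) (sd.2.getD (a, b) 0 + 1)   -- diff.get((a,b), 0) + 1
    let diff := diff.insert (b, a) (diff.getD (b, a) 0 - 1)
    (score, diff)
  | _ => sd  -- ValueError on 'a, b = gift.split()': outside Pre_solution

-- 'score = dict.fromkeys(names, 0)' then the gifts loop
def countsB (names : List String) (gifts : List String) :
    PySem.Dict String Int × PySem.Dict (String × String) Int :=
  gifts.foldl stepB (names.foldl (fun d f => d.insert f 0) PySem.Dict.empty, PySem.Dict.empty)

-- the hand-written 'while lo < hi' binary search of Source B; the fuel argument only makes the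
-- loop total (hi - lo shrinks every iteration, so fuel = hi - lo never runs out)
def bisectAux (vals : List Int) (s : Int) : Nat → Nat → Nat → Nat
  | 0, lo, _ => lo
  | fuel + 1, lo, hi =>
    if lo < hi then
      let mid := (lo + hi) / 2
      -- vals[mid]: mid is always in range here (lo ≤ mid < hi ≤ len(vals)), so getD is exact
      if vals.getD mid 0 < s then bisectAux vals s fuel (mid + 1) hi
      else bisectAux vals s fuel lo mid
    else lo

def bisect (vals : List Int) (s : Int) (lo hi : Nat) : Nat :=
  bisectAux vals s (hi - lo) lo hi

-- body of "for (x, y), d in diff.items()"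
def corrStep (score : PySem.Dict String Int) (wins : PySem.Dict String Int)
    (it : (String × String) × Int) : PySem.Dict String Int :=
  let wins1 := if it.2 > 0 then wins.insert it.1.1 (wins.getD it.1.1 0 + 1) else wins
  if it.2 ≠ 0 ∧ score.getD it.1.2 0 < score.getD it.1.1 0 then
    wins1.insert it.1.1 (wins1.getD it.1.1 0 - 1)
  else wins1

def solution_alt (friends : List String) (gifts : List String) : Int :=
  let names := PySem.List.dedup friends
  let sd := countsB names gifts
  let vals := PySem.List.sorted sd.1.values (fun v => v) false
  let wins := names.foldl
    (fun w f => w.insert f ((bisect vals (sd.1.getD f 0) 0 vals.length : Nat) : Int))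
    PySem.Dict.empty
  PySem.List.maxD ((sd.2.items.foldl (corrStep sd.1) wins).values) (fun v => v) 0

-- ===== PRECONDITION & SPEC =====
-- Pre_: exactly the inputs where A returns normally: every gift splits into exactly two
-- whitespace-separated tokens, both of which are friends (otherwise A raises
-- ValueError on unpacking or KeyError on the dict lookups).
def Pre_solution (friends : List String) (gifts : List String) : Prop :=
  ∀ g ∈ gifts, (PySem.Str.split₀ g).length = 2 ∧
    (PySem.Str.split₀ g).getD 0 "" ∈ friends ∧ (PySem.Str.split₀ g).getD 1 "" ∈ friends
instance (friends : List String) (gifts : List String) : Decidable (Pre_solution friends gifts) := by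
  unfold Pre_solution; infer_instance

def pvWitness_solution : List String × List String :=
  (["muzi", "frodo"], ["muzi frodo", "frodo muzi", "muzi frodo"])

def Spec_solution (friends : List String) (gifts : List String) (out : Int) : Prop := out = solution_alt friends gifts
instance (friends : List String) (gifts : List String) (out : Int) : Decidable (Spec_solution friends gifts out) := by unfold Spec_solution; infer_instance

-- ===== CLAIM (what is proved, stated in full; the proofs are below) =====
def Claim_equal_solution : Prop := ∀ (friends : List String) (gifts : List String), Dom_solution friends gifts → Pre_solution friends gifts → Spec_solution friends gifts (solution friends gifts)

-- ===== LEMMAS AND PROOFS =====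

-- the parsed (giver, receiver) pair of a gift string (proof-side; meaningful under Pre_)
def toPair (g : String) : String × String :=
  match PySem.Str.split₀ g with | [a, b] => (a, b) | _ => ("", "")

-- total number of gifts x gave to y
def cntG (gifts : List String) (x y : String) : Int := ((gifts.map toPair).count (x, y) : Int)

-- gift score of x: gifts given minus gifts received
def scoreG (gifts : List String) (x : String) : Int :=
  (((gifts.map toPair).map Prod.fst).count x : Int) - (((gifts.map toPair).map Prod.snd).count x : Int)

-- x beats y: strictly more gifts given, or a tie broken by a strictly larger gift score
def winG (gifts : List String) (x y : String) : Bool :=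
  decide (cntG gifts x y > cntG gifts y x) ||
    (decide (cntG gifts x y = cntG gifts y x) && decide (scoreG gifts x > scoreG gifts y))

-- B's rank correction for the ordered pair (f, r), through the abstract counts
def termG (gifts : List String) (f r : String) : Int :=
  (if cntG gifts f r - cntG gifts r f > 0 then 1 else 0) -
    (if cntG gifts f r - cntG gifts r f ≠ 0 ∧ scoreG gifts r < scoreG gifts f then 1 else 0)

-- ---------- shared helper ----------

-- a key-indexed insert loop: the last write for f wins
theorem foldl_insert_fun_getD {ν : Type} (l : List String) (g : String → ν) (dflt : ν)
    (d : PySem.Dict String ν) (f : String) :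
    (l.foldl (fun w k => w.insert k (g k)) d).getD f dflt
      = if f ∈ l then g f else d.getD f dflt := by
  induction l generalizing d with
  | nil => simp
  | cons k rest ih =>
    simp only [List.foldl_cons, ih, List.mem_cons]
    by_cases hr : f ∈ rest
    · simp [hr]
    · by_cases hk : f = k <;> simp [hr, hk, PySem.Dict.getD_insert]

-- ---------- A-side lemmas ----------

-- A's inner-loop body, expressed through winG
theorem innerA_char (GI : PySem.Dict String (Int × PySem.Dict String Int))
    (gifts : List String) (f r : String) (get : Int)
    (hcfr : (GI.getD r (0, PySem.Dict.empty)).2.getD f 0 = cntG gifts r f)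
    (hsf : (GI.getD f (0, PySem.Dict.empty)).1 = scoreG gifts f)
    (hsr : (GI.getD r (0, PySem.Dict.empty)).1 = scoreG gifts r) :
    innerA GI f get (r, cntG gifts f r)
      = if (!(f == r) && winG gifts f r) then get + 1 else get := by
  simp only [innerA, hcfr, hsf, hsr]
  by_cases hfr : f = r
  · simp [hfr]
  · have hb : (f == r) = false := by simp [hfr]
    simp only [hb, Bool.false_eq_true, if_false, Bool.not_false, Bool.true_and]
    by_cases h1 : cntG gifts f r > cntG gifts r f
    · simp [h1, winG]
    · by_cases h2 : cntG gifts f r = cntG gifts r f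
      · by_cases h3 : scoreG gifts f > scoreG gifts r
        · simp [h2, h3, winG]
        · simp [h2, h3, winG]
      · have hbeq : (cntG gifts f r == cntG gifts r f) = false := by simp [h2]
        simp [h1, h2, hbeq, winG]

theorem stepA_fold (S : List String) (gs : List String)
    (hP : ∀ g ∈ gs, ∃ a b, PySem.Str.split₀ g = [a, b] ∧ a ∈ S ∧ b ∈ S)
    (d : PySem.Dict String (Int × PySem.Dict String Int))
    (hk : d.keys = S)
    (hin : ∀ f ∈ S, ((d.getD f (0, PySem.Dict.empty)).2).keys = S) :
    (gs.foldl stepA d).keys = S ∧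
    (∀ f ∈ S, (((gs.foldl stepA d).getD f (0, PySem.Dict.empty)).2).keys = S) ∧
    (∀ f r, ((gs.foldl stepA d).getD f (0, PySem.Dict.empty)).1
        = (d.getD f (0, PySem.Dict.empty)).1
          + (((gs.map toPair).map Prod.fst).count f : Int)
          - (((gs.map toPair).map Prod.snd).count f : Int) ∧
      ((gs.foldl stepA d).getD f (0, PySem.Dict.empty)).2.getD r 0
        = (d.getD f (0, PySem.Dict.empty)).2.getD r 0 + ((gs.map toPair).count (f, r) : Int)) := by
  induction gs generalizing d with
  | nil => exact ⟨hk, hin, by simp⟩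
  | cons g rest ih =>
    obtain ⟨A, B, hsp, hAS, hBS⟩ := hP g (by simp)
    have hpair : toPair g = (A, B) := by simp [toPair, hsp]
    set dflt : Int × PySem.Dict String Int := (0, PySem.Dict.empty) with hdflt
    set v2 : Int × PySem.Dict String Int :=
      ((d.getD A dflt).1 + 1, (d.getD A dflt).2.insert B ((d.getD A dflt).2.getD B 0 + 1)) with hv2
    set D2 := d.insert A v2 with hD2
    have hstep : stepA d g = D2.insert B ((D2.getD B dflt).1 - 1, (D2.getD B dflt).2) := by
      simp only [stepA, hsp]
      rw [PySem.Dict.getD_insert_self, PySem.Dict.insert_insert_self]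
    -- keys facts
    have hkD2 : D2.keys = S := by
      rw [hD2, PySem.Dict.keys_insert_of_contains d v2
        ((PySem.Dict.contains_iff_mem_keys d A).2 (hk ▸ hAS))]
      exact hk
    have hkstep : (stepA d g).keys = S := by
      rw [hstep, PySem.Dict.keys_insert_of_contains D2 _
        ((PySem.Dict.contains_iff_mem_keys D2 B).2 (hkD2 ▸ hBS))]
      exact hkD2
    -- pointwise getD after the step
    have hget : ∀ f, (stepA d g).getD f dflt
        = if f = B then ((D2.getD B dflt).1 - 1, (D2.getD B dflt).2)
          else if f = A then v2 else d.getD f dflt := by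
      intro f
      rw [hstep, PySem.Dict.getD_insert]
      by_cases hfB : f = B
      · simp [hfB]
      · rw [if_neg hfB, if_neg hfB, hD2, PySem.Dict.getD_insert]
    have hD2get : ∀ f, D2.getD f dflt = if f = A then v2 else d.getD f dflt := by
      intro f; rw [hD2, PySem.Dict.getD_insert]
    -- inner keys preserved
    have hin' : ∀ f ∈ S, (((stepA d g).getD f dflt).2).keys = S := by
      intro f hf
      have hv2k : v2.2.keys = S := by
        rw [hv2]
        simp only []
        rw [PySem.Dict.keys_insert_of_contains _ _
          ((PySem.Dict.contains_iff_mem_keys _ B).2 ((hin A hAS) ▸ hBS))]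
        exact hin A hAS
      rw [hget f]
      by_cases hfB : f = B
      · rw [if_pos hfB]
        rw [hD2get B]
        by_cases hBA : B = A
        · simp only [if_pos hBA]; exact hv2k
        · simp only [if_neg hBA]; exact hin B hBS
      · rw [if_neg hfB]
        by_cases hfA : f = A
        · rw [if_pos hfA]; exact hv2k
        · rw [if_neg hfA]; exact hin f hf
    -- step value changes
    have hval : ∀ f r, ((stepA d g).getD f dflt).1
          = (d.getD f dflt).1 + (if A = f then 1 else 0) - (if B = f then 1 else 0) ∧
        ((stepA d g).getD f dflt).2.getD r 0
          = (d.getD f dflt).2.getD r 0 + (if (A, B) = (f, r) then 1 else 0) := by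
      intro f r
      have hv2get : v2.2.getD r 0 = (d.getD A dflt).2.getD r 0 + (if r = B then 1 else 0) := by
        rw [hv2]
        simp only []
        rw [PySem.Dict.getD_insert]
        by_cases hrB : r = B
        · subst hrB; simp
        · simp [hrB]
      rw [hget f]
      by_cases hfB : f = B
      · subst hfB
        rw [if_pos rfl, hD2get f]
        by_cases hfA : f = A
        · subst hfA
          constructor
          · rw [if_pos rfl, hv2]
            simp
          · rw [if_pos rfl, hv2get]
            by_cases hrB : r = f
            · subst hrB
              simp
            · have hne : ¬ ((f, f) = (f, r)) := by
                simp [Prod.ext_iff]; exact fun h => hrB (Eq.symm h)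
              simp [hrB, hne]
        · rw [if_neg hfA]
          constructor
          · have : ¬ (A = f) := fun h => hfA (Eq.symm h)
            simp [this]
          · have : ¬ ((A, f) = (f, r)) := by
              simp [Prod.ext_iff]
              exact fun h _ => hfA (Eq.symm h)
            simp [this]
      · rw [if_neg hfB]
        have hBf : ¬ (B = f) := fun h => hfB (Eq.symm h)
        by_cases hfA : f = A
        · subst hfA
          rw [if_pos rfl]
          constructor
          · rw [hv2]
            simp [hBf]
          · rw [hv2get]
            by_cases hrB : r = B
            · subst hrB
              simp
            · have : ¬ ((f, B) = (f, r)) := by simp [Prod.ext_iff]; exact fun h => hrB (Eq.symm h)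
              simp [hrB, this]
        · rw [if_neg hfA]
          have hAf : ¬ (A = f) := fun h => hfA (Eq.symm h)
          constructor
          · simp [hAf, hBf]
          · have : ¬ ((A, B) = (f, r)) := by simp [Prod.ext_iff]; intro h; exact absurd h hAf
            simp [this]
    -- recurse
    have hPr : ∀ g' ∈ rest, ∃ a b, PySem.Str.split₀ g' = [a, b] ∧ a ∈ S ∧ b ∈ S :=
      fun g' hg' => hP g' (List.mem_cons_of_mem _ hg')
    obtain ⟨ihk, ihin, ihval⟩ := ih hPr (stepA d g) hkstep hin'
    refine ⟨by rw [List.foldl_cons]; exact ihk, by rw [List.foldl_cons]; exact ihin, ?_⟩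
    intro f r
    obtain ⟨ihv1, ihv2⟩ := ihval f r
    obtain ⟨hv1, hv2'⟩ := hval f r
    rw [List.foldl_cons]
    constructor
    · rw [ihv1, hv1]
      simp only [List.map_cons, hpair, List.count_cons]
      by_cases h1 : A = f <;> by_cases h2 : B = f <;>
        simp [h1, h2] <;> ring
    · rw [ihv2, hv2']
      simp only [List.map_cons, hpair, List.count_cons]
      by_cases h1 : (A, B) = (f, r)
      · have : ((f, r) == (A, B)) = true := by simp [h1.symm]
        simp [h1, this]
        ring
      · have hb : ((f, r) == (A, B)) = false := by
          rw [beq_eq_false_iff_ne]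
          exact fun h => h1 (Eq.symm h)
        simp [h1, hb]

-- max(xs, default=0) for a nonnegative list is the running max from 0
theorem maxD_nonneg (xs : List Int) (h : ∀ x ∈ xs, 0 ≤ x) :
    PySem.List.maxD xs (fun v => v) 0 = xs.foldl max 0 := by
  cases xs with
  | nil => rfl
  | cons x t =>
    simp only [PySem.List.maxD, PySem.List.max?_id_cons, Option.getD_some, List.foldl_cons]
    rw [max_eq_right (h x (by simp))]

-- ---------- B-side lemmas ----------

-- in a ≤-sorted list the elements below s form a prefix of length countP (· < s)
theorem sorted_getD_lt_iff (vals : List Int) (s : Int) (hs : vals.Pairwise (· ≤ ·)) :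
    ∀ i < vals.length, (vals.getD i 0 < s ↔ i < vals.countP (fun v => decide (v < s))) := by
  induction vals with
  | nil => intro i hi; simp at hi
  | cons v t ih =>
    rw [List.pairwise_cons] at hs
    intro i hi
    by_cases hv : v < s
    · have hd : (decide (v < s)) = true := by simpa using hv
      cases i with
      | zero =>
        rw [List.getD_cons_zero, List.countP_cons, hd]
        simp only [if_true]
        exact ⟨fun _ => by omega, fun _ => hv⟩
      | succ j =>
        have hj := ih hs.2 j (by simpa using hi)
        rw [List.getD_cons_succ, List.countP_cons, hd, hj]
        simp only [if_true]
        omega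
    · have ht0 : t.countP (fun v => decide (v < s)) = 0 := by
        apply List.countP_eq_zero.2
        intro x hx
        have := hs.1 x hx
        simp only [decide_eq_true_eq]
        omega
      have hc : (v :: t).countP (fun v => decide (v < s)) = 0 := by
        simp [List.countP_cons, hv, ht0]
      rw [hc]
      cases i with
      | zero => simpa using hv
      | succ j =>
        simp only [List.getD_cons_succ]
        have hjl : j < t.length := by simpa using hi
        rw [List.getD_eq_getElem t 0 hjl]
        have := hs.1 _ (t.getElem_mem hjl)
        constructor
        · intro h; omega
        · omega

-- the hand-written binary search lands on the split point
theorem bisect_inv (vals : List Int) (s : Int) (c : Nat)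
    (hidx : ∀ i < vals.length, (vals.getD i 0 < s ↔ i < c)) :
    ∀ n lo hi, hi - lo ≤ n → lo ≤ c → c ≤ hi → hi ≤ vals.length →
      bisectAux vals s n lo hi = c := by
  intro n
  induction n with
  | zero =>
    intro lo hi h1 h2 h3 h4
    rw [bisectAux]
    omega
  | succ n ih =>
    intro lo hi h1 h2 h3 h4
    rw [bisectAux]
    by_cases hlh : lo < hi
    · rw [if_pos hlh]
      have hmlt : (lo + hi) / 2 < vals.length := by omega
      have hiff := hidx ((lo + hi) / 2) hmlt
      by_cases hmc : (lo + hi) / 2 < c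
      · rw [if_pos (hiff.2 hmc)]
        exact ih ((lo + hi) / 2 + 1) hi (by omega) (by omega) h3 h4
      · rw [if_neg (by intro h; exact hmc (hiff.1 h))]
        exact ih lo ((lo + hi) / 2) (by omega) h2 (by omega) (by omega)
    · rw [if_neg hlh]
      omega

theorem bisect_eq_countP (vals : List Int) (s : Int) (hs : vals.Pairwise (· ≤ ·)) :
    bisect vals s 0 vals.length = vals.countP (fun v => decide (v < s)) :=
  bisect_inv vals s _ (sorted_getD_lt_iff vals s hs) (vals.length - 0) 0 vals.length
    (by omega) (Nat.zero_le _) List.countP_le_length le_rfl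

-- the gifts loop of B: score and diff characterised through the abstract counts
set_option maxHeartbeats 1000000 in
theorem stepB_fold (S : List String) (gs : List String)
    (hP : ∀ g ∈ gs, ∃ a b, PySem.Str.split₀ g = [a, b] ∧ a ∈ S ∧ b ∈ S)
    (cs : PySem.Dict String Int × PySem.Dict (String × String) Int)
    (hk : cs.1.keys = S) :
    (gs.foldl stepB cs).1.keys = S ∧
    (∀ x, (gs.foldl stepB cs).1.getD x 0
        = cs.1.getD x 0 + (((gs.map toPair).map Prod.fst).count x : Int)
          - (((gs.map toPair).map Prod.snd).count x : Int)) ∧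
    (∀ p : String × String, (gs.foldl stepB cs).2.getD p 0
        = cs.2.getD p 0 + ((gs.map toPair).count p : Int) - ((gs.map toPair).count (p.2, p.1) : Int)) ∧
    (∀ p : String × String, p ∈ (gs.foldl stepB cs).2.keys
        ↔ p ∈ cs.2.keys ∨ p ∈ gs.map toPair ∨ (p.2, p.1) ∈ gs.map toPair) ∧
    (cs.2.keys.Nodup → (gs.foldl stepB cs).2.keys.Nodup) := by
  induction gs generalizing cs with
  | nil => exact ⟨hk, by simp, by simp, by simp, fun h => h⟩
  | cons g rest ih =>
    obtain ⟨a, b, hsp, haS, hbS⟩ := hP g (by simp)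
    have hpair : toPair g = (a, b) := by simp [toPair, hsp]
    set sc1 := cs.1.insert a (cs.1.getD a 0 + 1) with hsc1
    set sc2 := sc1.insert b (sc1.getD b 0 - 1) with hsc2
    set df1 := cs.2.insert (a, b) (cs.2.getD (a, b) 0 + 1) with hdf1
    set df2 := df1.insert (b, a) (df1.getD (b, a) 0 - 1) with hdf2
    have hstep : stepB cs g = (sc2, df2) := by
      rw [hsc2, hdf2, hsc1, hdf1]
      simp [stepB, hsp]
    -- score keys preserved
    have hksc1 : sc1.keys = S := by
      rw [hsc1, PySem.Dict.keys_insert_of_contains cs.1 _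
        ((PySem.Dict.contains_iff_mem_keys cs.1 a).2 (hk ▸ haS))]
      exact hk
    have hksc2 : sc2.keys = S := by
      rw [hsc2, PySem.Dict.keys_insert_of_contains sc1 _
        ((PySem.Dict.contains_iff_mem_keys sc1 b).2 (hksc1 ▸ hbS))]
      exact hksc1
    -- score pointwise
    have hgsc : ∀ x, sc2.getD x 0
        = cs.1.getD x 0 + (if a = x then 1 else 0) - (if b = x then 1 else 0) := by
      intro x
      rw [hsc2, PySem.Dict.getD_insert]
      by_cases hxb : x = b
      · subst hxb
        rw [if_pos rfl, hsc1, PySem.Dict.getD_insert]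
        by_cases hxa : x = a
        · subst hxa; simp
        · have : ¬ (a = x) := fun h => hxa h.symm
          simp [hxa, this]
      · rw [if_neg hxb, hsc1, PySem.Dict.getD_insert]
        have hbx : ¬ (b = x) := fun h => hxb h.symm
        by_cases hxa : x = a
        · subst hxa; simp [hbx]
        · have : ¬ (a = x) := fun h => hxa h.symm
          simp [hxa, this, hbx]
    -- diff pointwise
    have hgdf : ∀ p : String × String, df2.getD p 0
        = cs.2.getD p 0 + (if (a, b) = p then 1 else 0) - (if (b, a) = p then 1 else 0) := by
      intro p
      rw [hdf2, PySem.Dict.getD_insert]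
      by_cases hpba : p = (b, a)
      · subst hpba
        rw [if_pos rfl, hdf1, PySem.Dict.getD_insert]
        by_cases hab : ((b, a) : String × String) = (a, b)
        · have hba : b = a := by
            have := congrArg Prod.fst hab
            simpa using this
          subst hba
          simp
        · have h2 : ¬ ((a, b) = ((b, a) : String × String)) := fun h => hab h.symm
          simp [hab, h2]
      · rw [if_neg hpba, hdf1, PySem.Dict.getD_insert]
        have hbap : ¬ ((b, a) = p) := fun h => hpba h.symm
        by_cases hpab : p = (a, b)
        · subst hpab; simp [hbap]
        · have : ¬ ((a, b) = p) := fun h => hpab h.symm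
          simp [hpab, this, hbap]
    -- diff keys membership
    have hmdf : ∀ p : String × String, p ∈ df2.keys ↔ p = (a, b) ∨ p = (b, a) ∨ p ∈ cs.2.keys := by
      intro p
      rw [hdf2, PySem.Dict.mem_keys_insert, hdf1, PySem.Dict.mem_keys_insert]
      tauto
    -- diff keys nodup
    have hnddf : cs.2.keys.Nodup → df2.keys.Nodup := fun h =>
      PySem.Dict.nodup_keys_insert _ _ _ (PySem.Dict.nodup_keys_insert _ _ _ h)
    -- recurse
    have hPr : ∀ g' ∈ rest, ∃ a b, PySem.Str.split₀ g' = [a, b] ∧ a ∈ S ∧ b ∈ S :=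
      fun g' hg' => hP g' (List.mem_cons_of_mem _ hg')
    obtain ⟨ihk, ihs, ihd, ihm, ihn⟩ := ih hPr (stepB cs g) (by rw [hstep]; exact hksc2)
    simp only [List.foldl_cons]
    refine ⟨ihk, ?_, ?_, ?_, ?_⟩
    · intro x
      rw [ihs x, hstep]
      simp only [List.map_cons, hpair, List.count_cons]
      rw [hgsc x]
      by_cases h1 : a = x <;> by_cases h2 : b = x <;> simp [h1, h2] <;> ring
    · intro p
      obtain ⟨p1, p2⟩ := p
      rw [ihd (p1, p2), hstep]
      simp only [List.map_cons, hpair, List.count_cons]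
      rw [hgdf (p1, p2)]
      have e1 : (((p1, p2) : String × String) = (a, b)) ↔ (((a, b) : String × String) = (p1, p2)) :=
        eq_comm
      have e2 : (((p2, p1) : String × String) = (a, b)) ↔ (((b, a) : String × String) = (p1, p2)) := by
        simp only [Prod.mk.injEq]
        constructor
        · rintro ⟨x, y⟩; exact ⟨y.symm, x.symm⟩
        · rintro ⟨x, y⟩; exact ⟨y.symm, x.symm⟩
      by_cases h1 : ((a, b) : String × String) = (p1, p2)
      · by_cases h2 : ((b, a) : String × String) = (p1, p2)
        · simp only [beq_iff_eq, e1, e2, h1, h2, if_true, iff_true]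
          push_cast [h1, h2]
          rw [if_pos (show ((p1, p2) : String × String) = (p2, p1) by
            rw [Prod.mk.injEq] at h1 h2 ⊢
            exact ⟨h1.1.symm.trans h2.2, h1.2.symm.trans h2.1⟩)]
          ring
        · simp only [beq_iff_eq, e1, e2, h1, h2, if_true, iff_true, if_false, iff_false]
          push_cast [h1, h2]
          rw [if_neg (show ¬ ((p1, p2) : String × String) = (p2, p1) from fun h => h2 (by
            rw [Prod.mk.injEq] at h1 h ⊢
            exact ⟨h1.2.trans h.2, h1.1.trans h.1⟩))]
          ring
      · by_cases h2 : ((b, a) : String × String) = (p1, p2)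
        · simp only [beq_iff_eq, e1, e2, h1, h2, if_true, iff_true, if_false, iff_false]
          push_cast [h2]
          rw [if_pos (show ((a, b) : String × String) = (p2, p1) by
            rw [Prod.mk.injEq] at h2 ⊢
            exact ⟨h2.2, h2.1⟩)]
          ring
        · simp only [beq_iff_eq, e1, e2, h1, h2, if_false, iff_false]
          push_cast
          rw [if_neg (show ¬ ((a, b) : String × String) = (p2, p1) from fun h => h2 (by
            rw [Prod.mk.injEq] at h ⊢
            exact ⟨h.2, h.1⟩))]
          ring
    · intro p
      have hsw : (((p.2, p.1) : String × String) = (a, b)) ↔ (p = (b, a)) := by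
        obtain ⟨p1, p2⟩ := p
        simp only [Prod.mk.injEq]
        constructor
        · rintro ⟨x, y⟩; exact ⟨y, x⟩
        · rintro ⟨x, y⟩; exact ⟨y, x⟩
      rw [ihm p, hstep]
      simp only [List.map_cons, hpair, List.mem_cons]
      rw [hmdf p, hsw]
      constructor
      · rintro ((h | h | h) | h | h)
        · exact Or.inr (Or.inl (Or.inl h))
        · exact Or.inr (Or.inr (Or.inl h))
        · exact Or.inl h
        · exact Or.inr (Or.inl (Or.inr h))
        · exact Or.inr (Or.inr (Or.inr h))
      · rintro (h | (h | h) | (h | h))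
        · exact Or.inl (Or.inr (Or.inr h))
        · exact Or.inl (Or.inl h)
        · exact Or.inr (Or.inl h)
        · exact Or.inl (Or.inr (Or.inl h))
        · exact Or.inr (Or.inr h)
    · intro h
      exact ihn (by rw [hstep]; exact hnddf h)

-- one corrStep: only the giver's slot moves, by its rank-correction term
theorem corrStep_getD (score wins : PySem.Dict String Int) (p : (String × String) × Int)
    (hx : p.1.1 ∈ wins.keys) :
    (∀ f, (corrStep score wins p).getD f 0
        = wins.getD f 0 + (if p.1.1 = f then
            (if p.2 > 0 then (1 : Int) else 0)
              - (if p.2 ≠ 0 ∧ score.getD p.1.2 0 < score.getD p.1.1 0 then (1 : Int) else 0)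
          else 0)) ∧
    (corrStep score wins p).keys = wins.keys := by
  have h1 : ∀ v : Int, (wins.insert p.1.1 v).keys = wins.keys := fun v =>
    PySem.Dict.keys_insert_of_contains wins _
      ((PySem.Dict.contains_iff_mem_keys wins _).2 hx)
  have h2 : ∀ v w : Int, ((wins.insert p.1.1 w).insert p.1.1 v).keys = wins.keys := by
    intro v w
    rw [PySem.Dict.keys_insert_of_contains _ _
      ((PySem.Dict.contains_iff_mem_keys _ _).2 (by rw [h1 w]; exact hx))]
    exact h1 w
  constructor
  · intro f
    by_cases hxf : p.1.1 = f
    · subst hxf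
      by_cases hc1 : p.2 > 0 <;>
        by_cases hc2 : p.2 ≠ 0 ∧ score.getD p.1.2 0 < score.getD p.1.1 0 <;>
          simp [corrStep, hc1, hc2, PySem.Dict.getD_insert_self, PySem.Dict.getD_insert] <;>
          ring
    · have hfx : ¬ f = p.1.1 := fun h => hxf h.symm
      by_cases hc1 : p.2 > 0 <;>
        by_cases hc2 : p.2 ≠ 0 ∧ score.getD p.1.2 0 < score.getD p.1.1 0 <;>
          simp [corrStep, hc1, hc2, hxf, hfx, PySem.Dict.getD_insert]
  · by_cases hc1 : p.2 > 0 <;>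
      by_cases hc2 : p.2 ≠ 0 ∧ score.getD p.1.2 0 < score.getD p.1.1 0 <;>
        simp [corrStep, hc1, hc2, h1, h2]

-- the diff.items correction loop
theorem corr_fold (score : PySem.Dict String Int) (its : List ((String × String) × Int))
    (wins : PySem.Dict String Int) (hx : ∀ p ∈ its, p.1.1 ∈ wins.keys) :
    (∀ f, (its.foldl (corrStep score) wins).getD f 0
        = wins.getD f 0 + ((its.filter (fun p => p.1.1 == f)).map
            (fun p => (if p.2 > 0 then (1 : Int) else 0)
              - (if p.2 ≠ 0 ∧ score.getD p.1.2 0 < score.getD p.1.1 0 then (1 : Int) else 0))).sum) ∧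
    (its.foldl (corrStep score) wins).keys = wins.keys := by
  induction its generalizing wins with
  | nil => simp
  | cons p rest ih =>
    obtain ⟨hg, hk⟩ := corrStep_getD score wins p (hx p (by simp))
    have hx' : ∀ q ∈ rest, q.1.1 ∈ (corrStep score wins p).keys := by
      intro q hq; rw [hk]; exact hx q (List.mem_cons_of_mem _ hq)
    obtain ⟨ihg, ihk⟩ := ih (corrStep score wins p) hx'
    constructor
    · intro f
      rw [List.foldl_cons, ihg f, hg f, List.filter_cons]
      by_cases hpf : p.1.1 = f
      · rw [if_pos hpf, if_pos (show (p.1.1 == f) = true by simpa using hpf)]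
        simp only [List.map_cons, List.sum_cons]
        ring
      · rw [if_neg hpf, if_neg (show ¬ (p.1.1 == f) = true by simpa using hpf)]
        ring
    · rw [List.foldl_cons, ihk, hk]

-- a sum over a nodup sublist extends to the superlist when the function vanishes off it
theorem sum_map_eq_of_zero_off (L M : List String) (g : String → Int)
    (hLn : L.Nodup) (hMn : M.Nodup) (hsub : ∀ x ∈ L, x ∈ M)
    (hz : ∀ x ∈ M, x ∉ L → g x = 0) :
    (L.map g).sum = (M.map g).sum := by
  have hperm : (M.filter (fun x => decide (x ∈ L))).Perm L := by
    rw [List.perm_ext_iff_of_nodup (hMn.filter _) hLn]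
    intro x
    simp only [List.mem_filter, decide_eq_true_eq]
    exact ⟨fun h => h.2, fun h => ⟨hsub x h, h⟩⟩
  have hsplit : ((M.filter (fun x => decide (x ∈ L))
      ++ M.filter (fun x => !decide (x ∈ L))).map g).sum = (M.map g).sum :=
    ((List.filter_append_perm _ M).map g).sum_eq
  rw [List.map_append, List.sum_append] at hsplit
  have h2 : ((M.filter (fun x => !decide (x ∈ L))).map g).sum = 0 := by
    apply List.sum_eq_zero
    intro y hy
    obtain ⟨x, hxm, rfl⟩ := List.mem_map.1 hy
    have := List.mem_filter.1 hxm
    exact hz x this.1 (by simpa using this.2)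
  rw [h2, add_zero] at hsplit
  rw [← hsplit, (hperm.map g).sum_eq]

-- the pointwise identity behind B: score-rank indicator plus correction = win indicator
theorem point_eq (gifts : List String) (f r : String) :
    (if scoreG gifts r < scoreG gifts f then (1 : Int) else 0) + termG gifts f r
      = (if (!(f == r) && winG gifts f r) then (1 : Int) else 0) := by
  by_cases hfr : f = r
  · subst hfr
    simp [termG]
  · have hb : (f == r) = false := by simp [hfr]
    simp only [termG, winG, hb, Bool.not_false, Bool.true_and]
    rcases lt_trichotomy (cntG gifts f r) (cntG gifts r f) with h | h | h
    · have h1 : ¬ (cntG gifts f r - cntG gifts r f > 0) := by omega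
      have h2 : cntG gifts f r - cntG gifts r f ≠ 0 := by omega
      have h3 : ¬ (cntG gifts f r > cntG gifts r f) := by omega
      have h4 : ¬ (cntG gifts f r = cntG gifts r f) := by omega
      by_cases h5 : scoreG gifts r < scoreG gifts f <;>
        simp [h1, h2, h3, h4, h5]
    · have h1 : ¬ (cntG gifts f r - cntG gifts r f > 0) := by omega
      have h2 : ¬ (cntG gifts f r - cntG gifts r f ≠ 0) := by omega
      have h3 : ¬ (cntG gifts f r > cntG gifts r f) := by omega
      by_cases h5 : scoreG gifts r < scoreG gifts f
      · have h6 : scoreG gifts f > scoreG gifts r := by omega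
        simp [h1, h2, h3, h, h5, h6]
      · have h6 : ¬ (scoreG gifts f > scoreG gifts r) := by omega
        simp [h1, h2, h3, h, h5, h6]
    · have h1 : cntG gifts f r - cntG gifts r f > 0 := by omega
      have h2 : cntG gifts f r - cntG gifts r f ≠ 0 := by omega
      have h3 : cntG gifts f r > cntG gifts r f := by omega
      by_cases h5 : scoreG gifts r < scoreG gifts f <;>
        simp [h1, h2, h3, h5]

-- ===== VERDICT (by name: the statement is the Claim_ definition above) =====
set_option maxHeartbeats 1000000 in
theorem solution_spec : Claim_equal_solution := by
  intro friends gifts _ hPre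
  unfold Spec_solution
  -- shared data
  set S : List String := PySem.Set.ofList friends with hS
  have hndS : S.Nodup := PySem.Set.nodup_ofList friends
  have hmemS : ∀ z, z ∈ S ↔ z ∈ friends := fun z => PySem.Set.mem_ofList friends z
  have hPex : ∀ g ∈ gifts, ∃ a b, PySem.Str.split₀ g = [a, b] ∧ a ∈ S ∧ b ∈ S := by
    intro g hg
    obtain ⟨hlen, h0, h1⟩ := hPre g hg
    obtain ⟨a, b, hab⟩ := List.length_eq_two.1 hlen
    refine ⟨a, b, hab, ?_, ?_⟩
    · rw [hmemS]; simpa [hab] using h0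
    · rw [hmemS]; simpa [hab] using h1
  have hcomp : ∀ p ∈ gifts.map toPair, p.1 ∈ S ∧ p.2 ∈ S := by
    intro p hp
    obtain ⟨g, hg, rfl⟩ := List.mem_map.1 hp
    obtain ⟨a, b, hab, ha, hb⟩ := hPex g hg
    simp only [toPair, hab]
    exact ⟨ha, hb⟩
  set dflt : Int × PySem.Dict String Int := (0, PySem.Dict.empty) with hdflt
  -- ===== A side =====
  have hkInit : (giftIndexInit friends).keys = S := by
    rw [giftIndexInit, PySem.Dict.keys_foldl_insert]
    simp [PySem.Set.update_nil_left, hS]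
  have hInner0 : ∀ r, (friends.foldl (fun inner i => inner.insert i 0) PySem.Dict.empty).getD r (0 : Int) = 0 := by
    intro r
    rw [foldl_insert_fun_getD]
    simp
  have hInner0k : (friends.foldl (fun inner i => inner.insert i (0 : Int)) PySem.Dict.empty).keys = S := by
    rw [PySem.Dict.keys_foldl_insert]
    simp [PySem.Set.update_nil_left, hS]
  have hgInit : ∀ f, (giftIndexInit friends).getD f dflt
      = if f ∈ friends then (0, friends.foldl (fun inner i => inner.insert i 0) PySem.Dict.empty) else dflt := by
    intro f
    rw [giftIndexInit, foldl_insert_fun_getD]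
    simp [hdflt]
  have hInitIn : ∀ f ∈ S, (((giftIndexInit friends).getD f dflt).2).keys = S := by
    intro f hf
    rw [hgInit f, if_pos ((hmemS f).1 hf)]
    exact hInner0k
  obtain ⟨hkGI, hinGI, hvalGI⟩ := stepA_fold S gifts hPex (giftIndexInit friends) hkInit hInitIn
  have hGI1 : ∀ f, ((giftIndexFinal friends gifts).getD f dflt).1 = scoreG gifts f := by
    intro f
    rw [giftIndexFinal, (hvalGI f f).1, hgInit f]
    by_cases hf : f ∈ friends <;> simp [hf, scoreG, hdflt]
  have hGI2 : ∀ f r, ((giftIndexFinal friends gifts).getD f dflt).2.getD r 0 = cntG gifts f r := by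
    intro f r
    rw [giftIndexFinal, (hvalGI f r).2, hgInit f]
    by_cases hf : f ∈ friends
    · simp only [hf, if_true]
      rw [hInner0 r]
      simp [cntG]
    · simp [hf, hdflt, cntG]
  have hAitems : (giftIndexFinal friends gifts).items
      = S.map (fun f => (f, (giftIndexFinal friends gifts).getD f dflt)) := by
    have hnd : (giftIndexFinal friends gifts).keys.Nodup := by
      rw [giftIndexFinal, hkGI]; exact hndS
    rw [PySem.Dict.items_eq_map_keys _ hnd dflt, giftIndexFinal, hkGI]
  have hA : solution friends gifts
      = S.foldl (fun answer f =>
          max answer ((S.countP (fun r => !(f == r) && winG gifts f r) : Int))) 0 := by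
    rw [solution, hAitems, List.foldl_map]
    apply PySem.List.foldl_congr_mem'
    intro f hf answer
    have hwk : ((giftIndexFinal friends gifts).getD f dflt).2.keys = S := by
      rw [giftIndexFinal]; exact hinGI f hf
    have hwnd : ((giftIndexFinal friends gifts).getD f dflt).2.keys.Nodup := by
      rw [hwk]; exact hndS
    have hitems2 : ((giftIndexFinal friends gifts).getD f dflt).2.items
        = S.map (fun r => (r, ((giftIndexFinal friends gifts).getD f dflt).2.getD r 0)) := by
      rw [PySem.Dict.items_eq_map_keys _ hwnd 0, hwk]
    rw [hitems2, List.foldl_map]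
    have hinner : S.foldl (fun get r =>
          innerA (giftIndexFinal friends gifts) f get
            (r, ((giftIndexFinal friends gifts).getD f dflt).2.getD r 0)) 0
        = S.foldl (fun get r =>
            if (!(f == r) && winG gifts f r) then get + 1 else get) 0 := by
      apply PySem.List.foldl_congr_mem'
      intro r _ get
      rw [hGI2 f r]
      exact innerA_char _ gifts f r get (hGI2 r f) (hGI1 f) (hGI1 r)
    rw [hinner, PySem.List.foldl_if_add_one]
    simp
  -- ===== B side =====
  have hnames : PySem.List.dedup friends = S := by
    rw [PySem.List.dedup_eq_ofList, hS]
  have hk0 : (S.foldl (fun d f => d.insert f (0 : Int)) PySem.Dict.empty).keys = S := by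
    rw [PySem.Dict.keys_foldl_insert]
    simp [PySem.Set.update_nil_left, PySem.Set.ofList_eq_self_of_nodup S hndS]
  obtain ⟨hkSc, hsB, hdB, hmB, hnB⟩ := stepB_fold S gifts hPex
    (S.foldl (fun d f => d.insert f 0) PySem.Dict.empty, PySem.Dict.empty) hk0
  have hscoreG : ∀ x, (countsB S gifts).1.getD x 0 = scoreG gifts x := by
    intro x
    rw [countsB, hsB x, foldl_insert_fun_getD]
    simp [scoreG]
  have hdGv : ∀ p : String × String, (countsB S gifts).2.getD p 0
      = cntG gifts p.1 p.2 - cntG gifts p.2 p.1 := by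
    intro p
    rw [countsB, hdB p]
    simp [cntG]
  have hmK : ∀ p : String × String, p ∈ (countsB S gifts).2.keys
      ↔ p ∈ gifts.map toPair ∨ (p.2, p.1) ∈ gifts.map toPair := by
    intro p
    rw [countsB, hmB p]
    simp
  have hndK : (countsB S gifts).2.keys.Nodup := by
    rw [countsB]
    exact hnB PySem.Dict.nodup_keys_empty
  have hkK : (countsB S gifts).1.keys = S := by rw [countsB]; exact hkSc
  -- the sorted score values and the binary-search rank
  have hvals : (countsB S gifts).1.values.Perm (S.map (fun x => scoreG gifts x)) := by
    rw [PySem.Dict.values_eq_map_keys _ (by rw [hkK]; exact hndS) 0, hkK]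
    rw [List.map_congr_left (fun x _ => hscoreG x)]
  have hrank : ∀ s : Int,
      bisect (PySem.List.sorted (countsB S gifts).1.values (fun v => v) false) s 0
        (PySem.List.sorted (countsB S gifts).1.values (fun v => v) false).length
      = S.countP (fun r => decide (scoreG gifts r < s)) := by
    intro s
    rw [bisect_eq_countP _ s (PySem.List.sorted_pairwise (countsB S gifts).1.values (fun v => v))]
    rw [List.Perm.countP_eq _ ((PySem.List.sorted_perm _ _ _).trans hvals)]
    rw [List.countP_map]
    rfl
  -- the wins dict after the rank loop
  set g0 : String → Int := fun f =>
    ((bisect (PySem.List.sorted (countsB S gifts).1.values (fun v => v) false)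
      ((countsB S gifts).1.getD f 0) 0
      (PySem.List.sorted (countsB S gifts).1.values (fun v => v) false).length : Nat) : Int)
    with hg0
  have hwk0 : (S.foldl (fun w f => w.insert f (g0 f)) PySem.Dict.empty).keys = S := by
    rw [PySem.Dict.keys_foldl_insert]
    simp [PySem.Set.update_nil_left, PySem.Set.ofList_eq_self_of_nodup S hndS]
  have hwg0 : ∀ f ∈ S, (S.foldl (fun w f => w.insert f (g0 f)) PySem.Dict.empty).getD f 0
      = (S.countP (fun r => decide (scoreG gifts r < scoreG gifts f)) : Int) := by
    intro f hf
    rw [foldl_insert_fun_getD, if_pos hf, hg0]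
    simp only []
    rw [hscoreG f, hrank (scoreG gifts f)]
  -- the correction loop over diff.items
  have hitemsK : (countsB S gifts).2.items
      = (countsB S gifts).2.keys.map (fun k => (k, (countsB S gifts).2.getD k 0)) :=
    PySem.Dict.items_eq_map_keys _ hndK 0
  have hxK : ∀ p ∈ (countsB S gifts).2.items,
      p.1.1 ∈ (S.foldl (fun w f => w.insert f (g0 f)) PySem.Dict.empty).keys := by
    intro p hp
    rw [hwk0]
    rw [hitemsK] at hp
    obtain ⟨k, hk, rfl⟩ := List.mem_map.1 hp
    rcases (hmK k).1 hk with h | h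
    · exact (hcomp k h).1
    · exact (hcomp _ h).2
  obtain ⟨hcg, hck⟩ := corr_fold (countsB S gifts).1 (countsB S gifts).2.items
    (S.foldl (fun w f => w.insert f (g0 f)) PySem.Dict.empty) hxK
  -- the corrected value of each friend's slot
  have hwinsVal : ∀ f ∈ S,
      ((countsB S gifts).2.items.foldl (corrStep (countsB S gifts).1)
        (S.foldl (fun w f => w.insert f (g0 f)) PySem.Dict.empty)).getD f 0
      = (S.countP (fun r => !(f == r) && winG gifts f r) : Int) := by
    intro f hf
    rw [hcg f, hwg0 f hf]
    -- rewrite the filtered-items sum as a sum of termG over the keys' second components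
    have hsum1 : (((countsB S gifts).2.items.filter (fun p => p.1.1 == f)).map
        (fun p => (if p.2 > 0 then (1 : Int) else 0)
          - (if p.2 ≠ 0 ∧ (countsB S gifts).1.getD p.1.2 0 < (countsB S gifts).1.getD p.1.1 0
              then (1 : Int) else 0))).sum
        = ((((countsB S gifts).2.keys.filter (fun k => k.1 == f)).map Prod.snd).map
            (termG gifts f)).sum := by
      rw [hitemsK, List.filter_map, List.map_map, List.map_map]
      apply congrArg
      apply List.map_congr_left
      intro k hk
      have hkf : k.1 = f := by
        have := (List.mem_filter.1 hk).2
        simpa using this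
      simp only [Function.comp, hdGv, hscoreG, hkf, termG]
    rw [hsum1]
    -- extend the sparse sum to all of S
    set L : List String := ((countsB S gifts).2.keys.filter (fun k => k.1 == f)).map Prod.snd
      with hL
    have hLn : L.Nodup := by
      rw [hL]
      apply List.Nodup.map_on
      · intro x hx y hy hxy
        have hx1 : x.1 = f := by simpa using (List.mem_filter.1 hx).2
        have hy1 : y.1 = f := by simpa using (List.mem_filter.1 hy).2
        obtain ⟨x1, x2⟩ := x
        obtain ⟨y1, y2⟩ := y
        simp only at hx1 hy1 hxy
        rw [hx1, hy1, hxy]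
      · exact hndK.filter _
    have hLsub : ∀ r ∈ L, r ∈ S := by
      intro r hr
      rw [hL] at hr
      obtain ⟨k, hk, rfl⟩ := List.mem_map.1 hr
      have hkm := (List.mem_filter.1 hk).1
      rcases (hmK k).1 hkm with h | h
      · exact (hcomp k h).2
      · exact (hcomp _ h).1
    have hzero : ∀ r ∈ S, r ∉ L → termG gifts f r = 0 := by
      intro r _ hrL
      by_contra hne
      apply hrL
      have hd : cntG gifts f r - cntG gifts r f ≠ 0 := by
        intro h0
        apply hne
        simp [termG, h0]
      have hmem : (f, r) ∈ gifts.map toPair ∨ (r, f) ∈ gifts.map toPair := by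
        by_contra hno
        push_neg at hno
        have c1 : (gifts.map toPair).count (f, r) = 0 := List.count_eq_zero.2 hno.1
        have c2 : (gifts.map toPair).count (r, f) = 0 := List.count_eq_zero.2 hno.2
        apply hd
        simp [cntG, c1, c2]
      have hkm : ((f, r) : String × String) ∈ (countsB S gifts).2.keys := (hmK (f, r)).2 (by simpa using hmem)
      rw [hL]
      refine List.mem_map.2 ⟨(f, r), List.mem_filter.2 ⟨hkm, by simp⟩, rfl⟩
    rw [sum_map_eq_of_zero_off L S (termG gifts f) hLn hndS hLsub hzero]
    -- pointwise: rank indicator + correction = win indicator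
    have hcast : (S.countP (fun r => decide (scoreG gifts r < scoreG gifts f)) : Int)
        = (S.map (fun r => if scoreG gifts r < scoreG gifts f then (1 : Int) else 0)).sum := by
      rw [← PySem.List.sum_map_ite_one_zero (fun r => decide (scoreG gifts r < scoreG gifts f)) S]
      apply congrArg
      apply List.map_congr_left
      intro r _
      by_cases h : scoreG gifts r < scoreG gifts f <;> simp [h]
    rw [hcast, ← PySem.List.sum_map_add_int]
    have hpoint : (S.map (fun r =>
        (if scoreG gifts r < scoreG gifts f then (1 : Int) else 0) + termG gifts f r)).sum
        = (S.map (fun r => if (!(f == r) && winG gifts f r) then (1 : Int) else 0)).sum := by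
      apply congrArg
      apply List.map_congr_left
      intro r _
      exact point_eq gifts f r
    rw [hpoint]
    rw [← PySem.List.sum_map_ite_one_zero (fun r => !(f == r) && winG gifts f r) S]
  -- B's value is the max of the per-friend win counts
  have hBvals : ((countsB S gifts).2.items.foldl (corrStep (countsB S gifts).1)
        (S.foldl (fun w f => w.insert f (g0 f)) PySem.Dict.empty)).values
      = S.map (fun f => (S.countP (fun r => !(f == r) && winG gifts f r) : Int)) := by
    have hnd : ((countsB S gifts).2.items.foldl (corrStep (countsB S gifts).1)
        (S.foldl (fun w f => w.insert f (g0 f)) PySem.Dict.empty)).keys.Nodup := by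
      rw [hck, hwk0]; exact hndS
    rw [PySem.Dict.values_eq_map_keys _ hnd 0, hck, hwk0]
    exact List.map_congr_left (fun f hf => hwinsVal f hf)
  have hB : solution_alt friends gifts
      = S.foldl (fun answer f =>
          max answer ((S.countP (fun r => !(f == r) && winG gifts f r) : Int))) 0 := by
    rw [solution_alt]
    simp only [hnames, hg0]
    rw [hBvals, maxD_nonneg _ (by
      intro x hx
      obtain ⟨f, _, rfl⟩ := List.mem_map.1 hx
      positivity), List.foldl_map]
  rw [hA, hB]
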